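-- pv_equiv track=rewrite | github.com/Petingoso/FundamentosP_ex | 06/03_pet.py | implode2
-- ===== SOURCE A (Python) =====
-- def implode2(tup):
--     if isinstance(tup,tuple):
--         num = 0
--         i=0
--         for i in tup:
--             if not(isinstance(i,int) and 0<=i<=9):
--                 raise ValueError("elemento inválido")
--             num = num*10 + i
--         return num
--     raise ValueError("tuplo inválido")
-- ===== SOURCE B (Python) =====
-- def implode2(tup):
--     if isinstance(tup, tuple):
--         num = 0
--         mult = 1
--         for i in reversed(tup):
--             if not (isinstance(i, int) and 0 <= i <= 9):
--                 raise ValueError("elemento inválido")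
--             num += i * mult
--             mult *= 10
--         return num
--     raise ValueError("tuplo inválido")
-- ===== Notes on version B (the rewrite author's own statement) =====
-- stated objective: alternative
-- what changed: Replaces the left-to-right Horner accumulation (num = num*10 + i) by a least-significant-digit-first traversal that maintains an explicit power-of-ten positional weight (num += i*mult; mult *= 10).
import Mathlib
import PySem

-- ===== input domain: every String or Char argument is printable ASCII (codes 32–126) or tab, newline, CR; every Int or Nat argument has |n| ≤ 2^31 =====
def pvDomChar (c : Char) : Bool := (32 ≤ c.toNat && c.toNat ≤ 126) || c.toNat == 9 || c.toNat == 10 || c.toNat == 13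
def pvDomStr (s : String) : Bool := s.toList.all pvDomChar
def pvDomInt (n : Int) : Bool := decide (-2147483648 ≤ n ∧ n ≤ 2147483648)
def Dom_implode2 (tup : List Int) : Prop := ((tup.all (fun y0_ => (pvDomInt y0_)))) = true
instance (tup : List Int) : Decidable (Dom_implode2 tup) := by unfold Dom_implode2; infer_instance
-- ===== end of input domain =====

-- B rebuilds the number from the least significant digit with an explicit power-of-ten weight
-- instead of A's Horner accumulator; same O(n) cost, different decomposition.

-- ===== PORT A =====
-- A's loop: num = num*10 + i over the tuple left to right.
def implode2 (tup : List Int) : Int :=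
  tup.foldl (fun num i => num * 10 + i) 0

-- ===== PORT B =====
-- B's loop: over reversed(tup), num += i*mult; mult *= 10; return num.
def implode2_alt (tup : List Int) : Int :=
  (tup.reverse.foldl (fun (s : Int × Int) i => (s.1 + i * s.2, s.2 * 10)) (0, 1)).1

-- ===== PRECONDITION & SPEC =====
-- A raises ValueError ("elemento inválido") on any element outside 0..9;
-- Pre_ admits exactly the tuples of single decimal digits, where A returns normally.
def Pre_implode2 (tup : List Int) : Prop := ∀ i ∈ tup, 0 ≤ i ∧ i ≤ 9
instance (tup : List Int) : Decidable (Pre_implode2 tup) := by unfold Pre_implode2; infer_instance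
def pvWitness_implode2 : List Int := [4, 0, 7]

def Spec_implode2 (tup : List Int) (out : Int) : Prop := out = implode2_alt tup
instance (tup : List Int) (out : Int) : Decidable (Spec_implode2 tup out) := by unfold Spec_implode2; infer_instance

-- ===== CLAIM (what is proved, stated in full; the proofs are below) =====
def Claim_equal_implode2 : Prop := ∀ (tup : List Int), Dom_implode2 tup → Pre_implode2 tup → Spec_implode2 tup (implode2 tup)

-- ===== LEMMAS AND PROOFS =====
-- Horner over an appended last digit peels off that digit.
theorem horner_append (l : List Int) (i : Int) :
    implode2 (l ++ [i]) = implode2 l * 10 + i := by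
  simp [implode2, List.foldl_append]

-- B's fold state: running value of the reversed prefix plus the pending weight.
theorem alt_fold (l : List Int) (n m : Int) :
    l.foldl (fun (s : Int × Int) i => (s.1 + i * s.2, s.2 * 10)) (n, m)
      = (n + m * implode2 l.reverse, m * 10 ^ l.length) := by
  induction l generalizing n m with
  | nil => simp [implode2]
  | cons i l ih =>
      simp only [List.foldl_cons, List.reverse_cons, List.length_cons, ih, horner_append]
      exact Prod.ext (by ring) (by ring)

-- ===== VERDICT (by name: the statement is the Claim_ definition above) =====
theorem implode2_spec : Claim_equal_implode2 := by
  intro tup _ _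
  unfold Spec_implode2 implode2_alt
  rw [alt_fold]
  simp
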